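-- pv_equiv track=rewrite | github.com/MrBrantCode/unitest_baseline | mut_generate/mist_train_taco/taco_3715/solution.py | can_travel_in_zoo
-- ===== SOURCE A (Python) =====
-- def can_travel_in_zoo(u: int, v: int) -> bool:
--     if u > v:
--         return False
--
--     u_bin = bin(u)[2:]
--     v_bin = bin(v)[2:]
--
--     f = [int(bit) for bit in u_bin]
--     s = [int(bit) for bit in v_bin]
--
--     f.reverse()
--     s.reverse()
--
--     if len(s) < len(f):
--         for _ in range(len(f) - len(s)):
--             s.append(0)
--     else:
--         for _ in range(len(s) - len(f)):
--             f.append(0)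
--
--     f.append(0)
--     ones = 0
--
--     for i in range(len(s)):
--         ones += f[i] == 1
--         ones -= s[i] == 1
--         if ones < 0:
--             f[-1] = 1
--
--     return f[-1] == 0
-- ===== SOURCE B (Python) =====
-- def can_travel_in_zoo(u: int, v: int) -> bool:
--     if u > v:
--         return False
--     n = v.bit_length()
--     return all(bin(u & ((1 << k) - 1)).count('1') >= bin(v & ((1 << k) - 1)).count('1')
--                for k in range(n + 1))
-- ===== Notes on version B (the rewrite author's own statement) =====
-- stated objective: alternative
-- what changed: Replaces A's single stateful pass (reversed zero-padded bit lists, a running ones-balance and a sentinel flag cell) by stateless per-prefix checks: for every prefix length k up to v.bit_length(), compare the popcounts of u and v masked to their k lowest bits.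
import Mathlib
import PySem

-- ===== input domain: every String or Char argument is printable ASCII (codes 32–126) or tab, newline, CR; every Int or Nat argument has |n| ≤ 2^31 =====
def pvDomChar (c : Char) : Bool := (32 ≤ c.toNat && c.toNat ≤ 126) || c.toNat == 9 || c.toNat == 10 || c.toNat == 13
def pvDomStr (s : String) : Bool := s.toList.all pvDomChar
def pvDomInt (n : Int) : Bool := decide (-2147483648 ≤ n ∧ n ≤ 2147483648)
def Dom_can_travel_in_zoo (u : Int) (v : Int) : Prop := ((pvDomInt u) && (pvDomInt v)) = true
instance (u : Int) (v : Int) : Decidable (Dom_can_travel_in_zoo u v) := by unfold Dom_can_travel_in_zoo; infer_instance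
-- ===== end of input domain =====

-- B drops A's single running-balance pass over padded bit lists and instead checks each
-- prefix independently: popcount of the masked low bits of u vs of v (objective: alternative).

-- ===== PORT A =====
-- bin(n)[2:] digits, LSB-first (helper for pyBin); digits as Int, like Python's int(bit)
def bitsLSB (n : Nat) : List Int :=
  if h : n = 0 then [] else ((n % 2 : Nat) : Int) :: bitsLSB (n / 2)
decreasing_by exact Nat.div_lt_self (Nat.pos_of_ne_zero h) (by norm_num)

-- [int(bit) for bit in bin(n)[2:]]  (MSB-first, '0' for n = 0)
def pyBin (n : Nat) : List Int :=
  if n = 0 then [(0 : Int)] else (bitsLSB n).reverse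

-- the body of A's 'for i in range(len(s))' loop; state = (f, ones); the indices i are
-- in range throughout the loop, so List.getD is exact for Python's f[i] / s[i]
def aBody (s1 : List Int) (st : List Int × Int) (i : Nat) : List Int × Int :=
  let ones := st.2 + (if st.1.getD i 0 == 1 then (1 : Int) else 0)
                   - (if s1.getD i 0 == 1 then (1 : Int) else 0)
  if ones < 0 then (st.1.set (st.1.length - 1) 1, ones) else (st.1, ones)

def can_travel_in_zoo (u : Int) (v : Int) : Bool :=
  if u > v then false
  else
    -- bin() on a negative int makes A's int(bit) raise ValueError; Pre_ excludes that,
    -- so toNat is exact here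
    let f0 := (pyBin u.toNat).reverse
    let s0 := (pyBin v.toNat).reverse
    -- the two padding for-loops append 0 exactly (len f - len s) / (len s - len f) times
    let f1 := if s0.length < f0.length then f0
              else f0 ++ List.replicate (s0.length - f0.length) 0
    let s1 := if s0.length < f0.length then s0 ++ List.replicate (f0.length - s0.length) 0
              else s0
    let f2 := f1 ++ [(0 : Int)]                          -- f.append(0)
    let r := (List.range s1.length).foldl (aBody s1) (f2, (0 : Int))
    -- f[-1] == 0 ; f is never empty, so the index is in range and getD is exact
    ((PySem.List.pyGet? r.1 (-1)).getD 0) == 0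

-- ===== PORT B =====
-- v.bit_length(); nonnegative under Pre_, so the Nat recursion is exact
def bitLen (n : Nat) : Nat :=
  if h : n = 0 then 0 else bitLen (n / 2) + 1
decreasing_by exact Nat.div_lt_self (Nat.pos_of_ne_zero h) (by norm_num)

-- bin(x).count('1') for x ≥ 0: popcount by repeated halving
def popCnt (n : Nat) : Nat :=
  if h : n = 0 then 0 else n % 2 + popCnt (n / 2)
decreasing_by exact Nat.div_lt_self (Nat.pos_of_ne_zero h) (by norm_num)

def can_travel_in_zoo_alt (u : Int) (v : Int) : Bool :=
  if u > v then false
  else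
    -- under Pre_ we have 0 ≤ u ≤ v here, so x & ((1<<k)-1) is x % 2^k on Nat
    (List.range (bitLen v.toNat + 1)).all
      (fun k => decide (popCnt (v.toNat % 2 ^ k) ≤ popCnt (u.toNat % 2 ^ k)))

-- ===== PRECONDITION & SPEC =====
-- Pre_ excludes u ≤ v with u < 0: there A's int(bit) on bin()'s '-' sign raises ValueError.
def Pre_can_travel_in_zoo (u : Int) (v : Int) : Prop := v < u ∨ 0 ≤ u
instance (u : Int) (v : Int) : Decidable (Pre_can_travel_in_zoo u v) := by
  unfold Pre_can_travel_in_zoo; infer_instance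
def pvWitness_can_travel_in_zoo : Int × Int := (3, 5)

def Spec_can_travel_in_zoo (u : Int) (v : Int) (out : Bool) : Prop := out = can_travel_in_zoo_alt u v
instance (u : Int) (v : Int) (out : Bool) : Decidable (Spec_can_travel_in_zoo u v out) := by
  unfold Spec_can_travel_in_zoo; infer_instance

-- ===== CLAIM (what is proved, stated in full; the proofs are below) =====
def Claim_equal_can_travel_in_zoo : Prop := ∀ (u : Int) (v : Int), Dom_can_travel_in_zoo u v → Pre_can_travel_in_zoo u v → Spec_can_travel_in_zoo u v (can_travel_in_zoo u v)

-- ===== LEMMAS AND PROOFS =====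

-- bit i of n, and the running balance of set-bit counts over the k lowest bits
def pvBit (n : Nat) (i : Nat) : Int := ((n / 2 ^ i) % 2 : Nat)
def pvBal (u v : Nat) (k : Nat) : Int :=
  ((List.range k).map (fun i => pvBit u i - pvBit v i)).sum

lemma pvBit_zero (n : Nat) : pvBit n 0 = ((n % 2 : Nat) : Int) := by
  simp [pvBit]

lemma pvBit_succ (n i : Nat) : pvBit n (i + 1) = pvBit (n / 2) i := by
  simp [pvBit, Nat.div_div_eq_div_mul, pow_succ, mul_comm]

lemma pvBit_zero_left (i : Nat) : pvBit 0 i = 0 := by simp [pvBit]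

lemma pvBit_cases (n i : Nat) : pvBit n i = 0 ∨ pvBit n i = 1 := by
  unfold pvBit
  rcases Nat.mod_two_eq_zero_or_one (n / 2 ^ i) with h | h <;> simp [h]

lemma pvBal_succ_back (u v k : Nat) :
    pvBal u v (k + 1) = pvBal u v k + (pvBit u k - pvBit v k) := by
  unfold pvBal
  rw [List.range_succ]
  simp

lemma bitsLSB_getD (n : Nat) : ∀ i, (bitsLSB n).getD i 0 = pvBit n i := by
  induction n using Nat.strong_induction_on with
  | _ n ih =>
    intro i
    unfold bitsLSB
    split
    · next h => subst h; simp [pvBit_zero_left]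
    · next h =>
      cases i with
      | zero => simp [pvBit_zero]
      | succ j =>
        simp only [List.getD_cons_succ]
        rw [ih (n / 2) (Nat.div_lt_self (Nat.pos_of_ne_zero h) (by norm_num)) j, pvBit_succ]

lemma pyBin_rev_getD (n : Nat) (i : Nat) : ((pyBin n).reverse).getD i 0 = pvBit n i := by
  unfold pyBin
  split
  · next h => subst h; cases i <;> simp [pvBit_zero_left]
  · rw [List.reverse_reverse]; exact bitsLSB_getD n i

lemma getD_append_replicate (xs : List Int) (k i : Nat) :
    (xs ++ List.replicate k (0 : Int)).getD i 0 = xs.getD i 0 := by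
  rcases Nat.lt_or_ge i xs.length with h | h
  · rw [List.getD_append _ _ _ _ h]
  · rw [List.getD_eq_default xs _ h]
    rcases Nat.lt_or_ge i (xs.length + k) with h2 | h2
    · have hlen : i < (xs ++ List.replicate k (0 : Int)).length := by
        simp only [List.length_append, List.length_replicate]; omega
      rw [List.getD_eq_getElem _ _ hlen, List.getElem_append_right (by omega)]
      simp
    · rw [List.getD_eq_default _ _ (by simp only [List.length_append, List.length_replicate]; omega)]

-- bits beyond the bit-list length are 0
lemma pvBit_eq_zero_of_le (n i : Nat) (h : (bitsLSB n).length ≤ i) : pvBit n i = 0 := by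
  rw [← bitsLSB_getD n i, List.getD_eq_default _ _ h]

lemma length_bitsLSB_le (n : Nat) : (bitsLSB n).length ≤ ((pyBin n).reverse).length := by
  unfold pyBin
  split
  · next h => subst h; unfold bitsLSB; simp
  · simp

-- A's per-step delta as written in the loop body
def pvSA (f1 s1 : List Int) (k : Nat) : Int :=
  ((List.range k).map (fun i =>
    (if f1.getD i 0 == 1 then (1 : Int) else 0) - (if s1.getD i 0 == 1 then (1 : Int) else 0))).sum

-- A's sentinel flag after n iterations, starting from flag g
def pvFlag (f1 s1 : List Int) (c g : Int) : Nat → Int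
  | 0 => g
  | n + 1 => if c + pvSA f1 s1 (n + 1) < 0 then 1 else pvFlag f1 s1 c g n

lemma pvSA_succ (f1 s1 : List Int) (n : Nat) :
    pvSA f1 s1 (n + 1) = pvSA f1 s1 n +
      ((if f1.getD n 0 == 1 then (1 : Int) else 0) - (if s1.getD n 0 == 1 then (1 : Int) else 0)) := by
  unfold pvSA
  rw [List.range_succ]
  simp

lemma set_append_singleton (xs : List Int) (a b : Int) :
    (xs ++ [a]).set xs.length b = xs ++ [b] := by
  induction xs with
  | nil => simp
  | cons x xs ih => simp [ih]

-- the invariant of A's for-loop: the flag cell carries pvFlag, ones carries pvSA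
lemma aLoop (f1 s1 : List Int) (hlen : f1.length = s1.length) (g c : Int) :
    ∀ n, n ≤ s1.length →
    (List.range n).foldl (aBody s1) (f1 ++ [g], c) =
      (f1 ++ [pvFlag f1 s1 c g n], c + pvSA f1 s1 n) := by
  intro n
  induction n with
  | zero => intro _; simp [pvFlag, pvSA]
  | succ m ih =>
    intro hm
    rw [List.range_succ, List.foldl_append, ih (by omega)]
    simp only [List.foldl_cons, List.foldl_nil]
    unfold aBody
    have hget : (f1 ++ [pvFlag f1 s1 c g m]).getD m 0 = f1.getD m 0 := by
      rw [List.getD_append _ _ _ _ (by omega)]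
    simp only [hget]
    rw [pvSA_succ]
    by_cases hneg : c + pvSA f1 s1 m + (if f1.getD m 0 == 1 then (1 : Int) else 0)
        - (if s1.getD m 0 == 1 then (1 : Int) else 0) < 0
    · rw [if_pos hneg]
      have hL : (f1 ++ [pvFlag f1 s1 c g m]).length - 1 = f1.length := by simp
      rw [hL, set_append_singleton]
      have hfl : pvFlag f1 s1 c g (m + 1) = 1 := by
        show (if c + pvSA f1 s1 (m + 1) < 0 then (1 : Int) else pvFlag f1 s1 c g m) = 1
        rw [if_pos (by rw [pvSA_succ]; omega)]
      rw [hfl]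
      simp only [Prod.mk.injEq]
      exact ⟨trivial, by omega⟩
    · rw [if_neg hneg]
      have hfl : pvFlag f1 s1 c g (m + 1) = pvFlag f1 s1 c g m := by
        show (if c + pvSA f1 s1 (m + 1) < 0 then (1 : Int) else pvFlag f1 s1 c g m) = _
        rw [if_neg (by rw [pvSA_succ]; omega)]
      rw [hfl]
      simp only [Prod.mk.injEq]
      exact ⟨trivial, by omega⟩

lemma pvFlag_eq_zero_iff (f1 s1 : List Int) (n : Nat) :
    pvFlag f1 s1 0 0 n = 0 ↔ ∀ k, k ≤ n → 0 ≤ pvSA f1 s1 k := by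
  induction n with
  | zero =>
    constructor
    · intro _ k hk
      interval_cases k
      simp [pvSA]
    · intro _; rfl
  | succ m ih =>
    have hstep : pvFlag f1 s1 0 0 (m + 1)
        = if 0 + pvSA f1 s1 (m + 1) < 0 then 1 else pvFlag f1 s1 0 0 m := rfl
    rw [hstep]
    simp only [zero_add]
    by_cases h : pvSA f1 s1 (m + 1) < 0
    · rw [if_pos h]
      constructor
      · intro h1; cases h1
      · intro hall; exfalso; have := hall (m + 1) le_rfl; omega
    · rw [if_neg h, ih]
      constructor
      · intro hall k hk
        rcases Nat.lt_or_ge k (m + 1) with h2 | h2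
        · exact hall k (by omega)
        · have hk1 : k = m + 1 := by omega
          subst hk1; omega
      · intro hall k hk; exact hall k (by omega)

-- the if-expressed bit equals the bit itself (bits are 0 or 1)
lemma ite_bit (b : Int) (hb : b = 0 ∨ b = 1) : (if b == 1 then (1 : Int) else 0) = b := by
  rcases hb with h | h <;> simp [h]

-- the core of A after padding, characterised: run the loop, read the flag
lemma core_iff (f1 s1 : List Int) (U V : Nat)
    (hlen : f1.length = s1.length)
    (hf : ∀ i, f1.getD i 0 = pvBit U i)
    (hs : ∀ i, s1.getD i 0 = pvBit V i)
    (hfz : ∀ i, s1.length ≤ i → pvBit U i = 0)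
    (hsz : ∀ i, s1.length ≤ i → pvBit V i = 0) :
    (((PySem.List.pyGet?
        ((List.range s1.length).foldl (aBody s1) (f1 ++ [(0 : Int)], (0 : Int))).1 (-1)).getD 0 == 0)
      = true) ↔ ∀ k, 0 ≤ pvBal U V k := by
  rw [aLoop f1 s1 hlen 0 0 s1.length le_rfl]
  simp only [PySem.List.pyGet?_neg_one_append_singleton, Option.getD_some, beq_iff_eq]
  have hSA : ∀ k, pvSA f1 s1 k = pvBal U V k := by
    intro k
    unfold pvSA pvBal
    congr 1
    apply List.map_congr_left
    intro i _
    rw [hf i, hs i, ite_bit _ (pvBit_cases U i), ite_bit _ (pvBit_cases V i)]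
  have hstable : ∀ j, pvBal U V (s1.length + j) = pvBal U V s1.length := by
    intro j
    induction j with
    | zero => rfl
    | succ m ihm =>
      have hsm : s1.length + (m + 1) = (s1.length + m) + 1 := rfl
      rw [hsm, pvBal_succ_back, hfz _ (by omega), hsz _ (by omega), ihm]
      ring
  rw [pvFlag_eq_zero_iff]
  constructor
  · intro hall k
    rcases Nat.lt_or_ge s1.length k with h2 | h2
    · have hj := hstable (k - s1.length)
      rw [Nat.add_sub_cancel' (by omega)] at hj
      rw [hj, ← hSA s1.length]
      exact hall s1.length le_rfl
    · rw [← hSA k]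
      exact hall k h2
  · intro hall k _
    rw [hSA k]
    exact hall k

lemma length_f1 (U V : Nat) :
    (if ((pyBin V).reverse).length < ((pyBin U).reverse).length then (pyBin U).reverse
      else (pyBin U).reverse ++ List.replicate (((pyBin V).reverse).length - ((pyBin U).reverse).length) 0).length
    = (if ((pyBin V).reverse).length < ((pyBin U).reverse).length
        then (pyBin V).reverse ++ List.replicate (((pyBin U).reverse).length - ((pyBin V).reverse).length) 0
        else (pyBin V).reverse).length := by
  split
  · next h =>
    simp only [List.length_append, List.length_replicate, List.length_reverse] at h ⊢
    omega
  · next h =>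
    simp only [List.length_append, List.length_replicate, List.length_reverse] at h ⊢
    omega

-- A (past the u > v guard) is the same predicate
lemma A_true_iff (U V : Nat) :
    ((let f0 := (pyBin U).reverse
      let s0 := (pyBin V).reverse
      let f1 := if s0.length < f0.length then f0
                else f0 ++ List.replicate (s0.length - f0.length) 0
      let s1 := if s0.length < f0.length then s0 ++ List.replicate (f0.length - s0.length) 0
                else s0
      let f2 := f1 ++ [(0 : Int)]
      let r := (List.range s1.length).foldl (aBody s1) (f2, (0 : Int))
      ((PySem.List.pyGet? r.1 (-1)).getD 0) == 0) = true) ↔ ∀ k, 0 ≤ pvBal U V k := by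
  have hlen := length_f1 U V
  refine core_iff _ _ U V hlen ?_ ?_ ?_ ?_
  · intro i
    split
    · exact pyBin_rev_getD U i
    · rw [getD_append_replicate]; exact pyBin_rev_getD U i
  · intro i
    split
    · rw [getD_append_replicate]; exact pyBin_rev_getD V i
    · exact pyBin_rev_getD V i
  · intro i hi
    apply pvBit_eq_zero_of_le
    have h1 := length_bitsLSB_le U
    rw [← hlen] at hi
    by_cases hc : ((pyBin V).reverse).length < ((pyBin U).reverse).length
    · rw [if_pos hc] at hi
      simp only [List.length_reverse] at hi h1 hc
      omega
    · rw [if_neg hc] at hi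
      simp only [List.length_append, List.length_replicate, List.length_reverse] at hi h1 hc
      omega
  · intro i hi
    apply pvBit_eq_zero_of_le
    have h1 := length_bitsLSB_le V
    by_cases hc : ((pyBin V).reverse).length < ((pyBin U).reverse).length
    · rw [if_pos hc] at hi
      simp only [List.length_append, List.length_replicate, List.length_reverse] at hi h1 hc
      omega
    · rw [if_neg hc] at hi
      simp only [List.length_reverse] at hi h1 hc
      omega

-- ===== B-side lemmas =====

-- popCnt over 2m+b peels one bit
lemma popCnt_zero : popCnt 0 = 0 := by
  rw [popCnt]; simp

lemma popCnt_two_mul_add (m b : Nat) (hb : b < 2) : popCnt (2 * m + b) = b + popCnt m := by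
  by_cases h : 2 * m + b = 0
  · have hm : m = 0 := by omega
    have hb0 : b = 0 := by omega
    subst hm; subst hb0
    simp [popCnt_zero]
  · rw [popCnt, dif_neg h]
    have h1 : (2 * m + b) % 2 = b := by omega
    have h2 : (2 * m + b) / 2 = m := by omega
    rw [h1, h2]

-- popcount of the k lowest bits equals the partial sum of bits
lemma popCnt_mod_pow : ∀ (k U : Nat),
    ((popCnt (U % 2 ^ k) : Int)) = ((List.range k).map (fun i => pvBit U i)).sum := by
  intro k
  induction k with
  | zero => intro U; rw [pow_zero, Nat.mod_one, popCnt_zero]; simp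
  | succ n ih =>
    intro U
    have hsplit : U % 2 ^ (n + 1) = 2 * (U / 2 % 2 ^ n) + U % 2 := by
      have h1 : U % 2 ^ (n + 1) = U % 2 + 2 * (U / 2 % 2 ^ n) := by
        rw [pow_succ, mul_comm (2 ^ n) 2, Nat.mod_mul]
      omega
    rw [hsplit, popCnt_two_mul_add _ _ (Nat.mod_lt _ (by norm_num)),
        List.range_succ_eq_map]
    simp only [List.map_cons, List.sum_cons, List.map_map, Function.comp_def, pvBit_succ]
    rw [← ih (U / 2)]
    simp [pvBit_zero]

-- the balance is the difference of the two masked popcounts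
lemma pvBal_eq_popCnt (U V k : Nat) :
    pvBal U V k = (popCnt (U % 2 ^ k) : Int) - (popCnt (V % 2 ^ k) : Int) := by
  rw [popCnt_mod_pow, popCnt_mod_pow]
  unfold pvBal
  induction k with
  | zero => simp
  | succ n ih =>
    rw [List.range_succ]
    simp only [List.map_append, List.sum_append, List.map_cons, List.map_nil,
      List.sum_cons, List.sum_nil]
    omega

-- n < 2 ^ bit_length n
lemma lt_two_pow_bitLen (n : Nat) : n < 2 ^ bitLen n := by
  induction n using Nat.strong_induction_on with
  | _ n ih =>
    rw [bitLen]
    split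
    · next h => subst h; norm_num
    · next h =>
      have := ih (n / 2) (Nat.div_lt_self (Nat.pos_of_ne_zero h) (by norm_num))
      rw [pow_succ]
      omega

lemma pvBit_zero_of_lt (n i : Nat) (h : n < 2 ^ i) : pvBit n i = 0 := by
  unfold pvBit
  rw [Nat.div_eq_of_lt h]
  rfl

-- B's all-loop is the universal prefix condition, given U ≤ V
lemma B_true_iff (U V : Nat) (hUV : U ≤ V) :
    ((List.range (bitLen V + 1)).all
      (fun k => decide (popCnt (V % 2 ^ k) ≤ popCnt (U % 2 ^ k))) = true)
    ↔ ∀ k, 0 ≤ pvBal U V k := by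
  rw [List.all_eq_true]
  simp only [decide_eq_true_eq]
  have hiff : ∀ k, (popCnt (V % 2 ^ k) ≤ popCnt (U % 2 ^ k)) ↔ 0 ≤ pvBal U V k := by
    intro k
    rw [pvBal_eq_popCnt]
    omega
  constructor
  · intro hall k
    set n := bitLen V with hn
    rcases Nat.lt_or_ge n k with h2 | h2
    · -- bits at and above n are 0, so the balance is stable beyond n
      have hstable : ∀ j, pvBal U V (n + j) = pvBal U V n := by
        intro j
        induction j with
        | zero => rfl
        | succ m ihm =>
          have hVn : V < 2 ^ (n + m) := lt_of_lt_of_le (lt_two_pow_bitLen V)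
            (Nat.pow_le_pow_right (by norm_num) (by omega))
          have hsm : n + (m + 1) = (n + m) + 1 := rfl
          rw [hsm, pvBal_succ_back, pvBit_zero_of_lt U _ (by omega),
              pvBit_zero_of_lt V _ hVn, ihm]
          ring
      have hj := hstable (k - n)
      rw [Nat.add_sub_cancel' (by omega)] at hj
      rw [hj, ← hiff n]
      exact hall n (List.mem_range.mpr (by omega))
    · rw [← hiff k]
      exact hall k (List.mem_range.mpr (by omega))
  · intro hall k _
    rw [hiff k]
    exact hall k

-- ===== VERDICT (by name: the statement is the Claim_ definition above) =====
theorem can_travel_in_zoo_spec : Claim_equal_can_travel_in_zoo := by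
  intro u v _ hpre
  unfold Spec_can_travel_in_zoo can_travel_in_zoo can_travel_in_zoo_alt
  by_cases hgt : u > v
  · simp [hgt]
  · simp only [if_neg hgt]
    have hu : (0 : Int) ≤ u := by
      rcases hpre with h | h
      · exfalso; exact hgt h
      · exact h
    have hUV : u.toNat ≤ v.toNat := by omega
    exact Bool.eq_iff_iff.mpr
      ((A_true_iff u.toNat v.toNat).trans (B_true_iff u.toNat v.toNat hUV).symm)
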